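-- pv_equiv track=rewrite | github.com/wangwang110/TwoWaysToImproveCSC_lww | large_data/generate_csc_data_wang_ner.py | replace_token
-- ===== SOURCE A (Python) =====
-- def replace_token(line, words, ner_words, error_line):
--     """
--     # 随机选取id，查看id对应的词是否在候选集中
--     # 如果在90%替换为候选词，10%随机选取token（来自哪里呢？统计字典）
--     # 知道1/4的字符被替换
--     :param line:
--     :return:
--     """
--     num = len(line)
--     ner_word_ids = []
--     for item in ner_words:
--         if item[1] == "DATE":
--             continue
--         start = sum([len(words[i]) for i in range(item[2])])
--         ids = [j for j in range(start, start + len(item[0]))]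
--         ner_word_ids.extend(ids)
--     src_tokens = list(error_line)
--     trg_tokens = list(line)
--     for i in range(num):
--         if i in ner_word_ids and src_tokens[i] != trg_tokens[i]:
--             src_tokens[i] = trg_tokens[i]
--     return "".join(src_tokens)
-- ===== SOURCE B (Python) =====
-- def replace_token(line, words, ner_words, error_line):
--     prefix = [0]
--     total = 0
--     for w in words:
--         total += len(w)
--         prefix.append(total)
--     ner_ids = set()
--     for text, tag, idx in ner_words:
--         if tag == "DATE":
--             continue
--         start = prefix[idx] if idx > 0 else 0
--         ner_ids.update(range(start, start + len(text)))
--     n = len(line)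
--     return "".join(line[i] if i < n and i in ner_ids else c
--                    for i, c in enumerate(error_line))
-- ===== Notes on version B (the rewrite author's own statement) =====
-- stated objective: faster
-- what changed: B precomputes prefix sums of word lengths in one pass and collects NER character positions in a set, then rebuilds the string in a single enumerate pass over error_line, instead of A's per-item re-summation of word lengths and per-position linear scan of the id list.
import Mathlib
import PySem

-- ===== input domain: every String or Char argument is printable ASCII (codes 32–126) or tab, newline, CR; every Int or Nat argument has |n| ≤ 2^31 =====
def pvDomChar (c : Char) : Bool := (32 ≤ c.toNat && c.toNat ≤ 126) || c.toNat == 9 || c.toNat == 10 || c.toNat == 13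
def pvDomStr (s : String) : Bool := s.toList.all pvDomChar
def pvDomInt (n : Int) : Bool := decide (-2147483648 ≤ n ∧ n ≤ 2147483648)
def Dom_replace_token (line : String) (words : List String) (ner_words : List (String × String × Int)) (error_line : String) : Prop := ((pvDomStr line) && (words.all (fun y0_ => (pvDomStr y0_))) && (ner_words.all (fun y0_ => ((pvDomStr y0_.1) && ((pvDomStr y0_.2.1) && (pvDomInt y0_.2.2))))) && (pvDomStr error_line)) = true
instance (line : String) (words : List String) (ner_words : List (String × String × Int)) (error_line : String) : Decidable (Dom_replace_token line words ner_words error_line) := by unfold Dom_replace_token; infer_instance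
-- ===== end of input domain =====

-- B replaces A's per-item re-summation of word lengths and the per-position scan of the id list by one
-- prefix-sum pass over words, a set of NER positions, and a single enumerate pass over error_line.

-- ===== PORT A =====
def replace_token (line : String) (words : List String) (ner_words : List (String × String × Int)) (error_line : String) : String :=
  let num : Int := PySem.Str.len line
  let ner_word_ids : List Int := ner_words.foldl (fun acc item =>
    if item.2.1 == "DATE" then acc
    else
      let start : Int := ((PySem.List.pyRange 0 item.2.2 1).map
        (fun i => PySem.Str.len ((PySem.List.pyGet? words i).getD ""))).sum
      let ids := PySem.List.pyRange start (start + PySem.Str.len item.1) 1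
      acc ++ ids) []
  let trg_tokens := line.toList
  let src_final := (PySem.List.pyRange 0 num 1).foldl (fun st i =>
    if ner_word_ids.contains i && (PySem.List.pyGetD st i ' ' != PySem.List.pyGetD trg_tokens i ' ')
    then PySem.List.pySetD st i (PySem.List.pyGetD trg_tokens i ' ')
    else st) error_line.toList
  String.ofList src_final

-- ===== PORT B =====
def replace_token_alt (line : String) (words : List String) (ner_words : List (String × String × Int)) (error_line : String) : String :=
  let pr : List Int × Int := words.foldl
    (fun st w => (st.1 ++ [st.2 + PySem.Str.len w], st.2 + PySem.Str.len w)) ([0], 0)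
  let ner_ids : PySem.Set Int := ner_words.foldl (fun s item =>
    if item.2.1 == "DATE" then s
    else
      let start : Int := if item.2.2 > 0 then PySem.List.pyGetD pr.1 item.2.2 0 else 0
      PySem.Set.update s (PySem.List.pyRange start (start + PySem.Str.len item.1) 1))
    PySem.Set.empty
  let n : Int := PySem.Str.len line
  String.ofList ((PySem.List.enumerate error_line.toList 0).map
    (fun ic => if ic.1 < n && ner_ids.contains ic.1 then PySem.List.pyGetD line.toList ic.1 ' ' else ic.2))

-- ===== PRECONDITION & SPEC =====
-- sum of the lengths of the first k words (the start offset A computes for word index k)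
def sumTake (words : List String) (k : Nat) : Int := ((words.take k).map PySem.Str.len).sum

-- Pre_ excludes exactly the inputs where Python A raises IndexError: a non-DATE ner item whose word
-- index exceeds len(words) (words[i] in the start sum), or whose character span contains a position
-- that is inside line but beyond the end of error_line (src_tokens[i]).
def Pre_replace_token (line : String) (words : List String) (ner_words : List (String × String × Int)) (error_line : String) : Prop :=
  ∀ item ∈ ner_words, item.2.1 ≠ "DATE" →
    item.2.2 ≤ (words.length : Int) ∧
    min (sumTake words item.2.2.toNat + (item.1.toList.length : Int)) (line.toList.length : Int)
      ≤ max (sumTake words item.2.2.toNat) (error_line.toList.length : Int)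
instance (line : String) (words : List String) (ner_words : List (String × String × Int)) (error_line : String) : Decidable (Pre_replace_token line words ner_words error_line) := by unfold Pre_replace_token; infer_instance

def pvWitness_replace_token : String × List String × (List (String × String × Int)) × String :=
  ("ab", ["a", "b"], [("b", "PER", 1)], "xx")

def Spec_replace_token (line : String) (words : List String) (ner_words : List (String × String × Int)) (error_line : String) (out : String) : Prop := out = replace_token_alt line words ner_words error_line
instance (line : String) (words : List String) (ner_words : List (String × String × Int)) (error_line : String) (out : String) : Decidable (Spec_replace_token line words ner_words error_line out) := by unfold Spec_replace_token; infer_instance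

-- ===== CLAIM (what is proved, stated in full; the proofs are below) =====
def Claim_equal_replace_token : Prop := ∀ (line : String) (words : List String) (ner_words : List (String × String × Int)) (error_line : String), Dom_replace_token line words ner_words error_line → Pre_replace_token line words ner_words error_line → Spec_replace_token line words ner_words error_line (replace_token line words ner_words error_line)
-- ===== LEMMAS AND PROOFS =====

theorem sumTake_cons (w : String) (ws : List String) (k : Nat) :
    sumTake (w :: ws) (k + 1) = PySem.Str.len w + sumTake ws k := by
  rw [sumTake, sumTake, List.take_succ_cons, List.map_cons, List.sum_cons]

theorem sumTake_succ_get (words : List String) (n : Nat) (hn : n < words.length) :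
    sumTake words (n + 1) = sumTake words n + PySem.Str.len words[n] := by
  rw [sumTake, sumTake, List.take_add_one, List.getElem?_eq_getElem hn, List.map_append, List.sum_append]; rfl

theorem startA_nat (words : List String) (m : Nat) (h : m ≤ words.length) :
    ((List.range m).map (fun k => PySem.Str.len ((PySem.List.pyGet? words ((k : Nat) : Int)).getD ""))).sum
      = sumTake words m := by
  induction m with
  | zero => simp [sumTake]
  | succ n ih =>
    have hn : n < words.length := by omega
    rw [List.range_succ, List.map_append, List.sum_append, ih (by omega), sumTake_succ_get words n hn]
    simp [PySem.List.pyGet?_natCast, List.getElem?_eq_getElem hn]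

theorem startA_eq (words : List String) (idx : Int) (h : idx ≤ (words.length : Int)) :
    ((PySem.List.pyRange 0 idx 1).map
      (fun i => PySem.Str.len ((PySem.List.pyGet? words i).getD ""))).sum = sumTake words idx.toNat := by
  by_cases h0 : idx ≤ 0
  · rw [PySem.List.pyRange_one_eq_nil h0]
    simp [sumTake, Int.toNat_of_nonpos h0]
  · have h0 : 0 < idx := by omega
    have h2 : idx = (idx.toNat : Int) := by omega
    rw [h2, PySem.List.pyRange_zero_natCast, List.map_map]
    exact startA_nat words idx.toNat (by omega)

theorem prefix_spec (ws : List String) (p : List Int) (t : Int) :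
    ws.foldl (fun st w => (st.1 ++ [st.2 + PySem.Str.len w], st.2 + PySem.Str.len w)) (p, t)
      = (p ++ (List.range ws.length).map (fun k => t + sumTake ws (k + 1)), t + sumTake ws ws.length) := by
  induction ws generalizing p t with
  | nil => simp [sumTake]
  | cons w rest ih =>
    rw [List.foldl_cons, ih]
    refine Prod.ext ?_ ?_
    · show p ++ [t + PySem.Str.len w] ++ _ = p ++ _
      rw [List.length_cons, List.range_succ_eq_map, List.map_cons, List.map_map, List.append_assoc,
        List.singleton_append]
      congr 1
      congr 1
      refine List.map_congr_left ?_
      intro k _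
      show t + PySem.Str.len w + sumTake rest (k + 1) = t + sumTake (w :: rest) (k.succ + 1)
      rw [show k.succ + 1 = (k + 1) + 1 from rfl, sumTake_cons]
      ring
    · show t + PySem.Str.len w + sumTake rest rest.length = t + sumTake (w :: rest) (rest.length + 1)
      rw [sumTake_cons]; ring

theorem startB_eq (words : List String) (idx : Int) (h : idx ≤ (words.length : Int)) :
    (if idx > 0
      then PySem.List.pyGetD (words.foldl
        (fun st w => (st.1 ++ [st.2 + PySem.Str.len w], st.2 + PySem.Str.len w)) (([0] : List Int), (0 : Int))).1 idx 0
      else 0) = sumTake words idx.toNat := by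
  by_cases h0 : idx > 0
  · rw [if_pos h0, prefix_spec]
    have h2 : idx = (idx.toNat : Int) := by omega
    rw [h2, PySem.List.pyGetD_natCast]
    obtain ⟨m, hm⟩ : ∃ m, idx.toNat = m + 1 := ⟨idx.toNat - 1, by omega⟩
    have hmlt : m < words.length := by omega
    rw [hm, List.singleton_append, List.getD_cons_succ, List.getD_eq_getElem _ _ (by simpa using hmlt),
      List.getElem_map, List.getElem_range]
    simp
  · have hz : idx.toNat = 0 := by omega
    simp [if_neg h0, hz, sumTake]

-- the set of positions both programs restore
def Pmem (words : List String) (ner_words : List (String × String × Int)) (i : Int) : Prop :=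
  ∃ item ∈ ner_words, item.2.1 ≠ "DATE" ∧
    sumTake words item.2.2.toNat ≤ i ∧ i < sumTake words item.2.2.toNat + (item.1.toList.length : Int)

theorem memA (words : List String) (ner_words : List (String × String × Int))
    (h : ∀ item ∈ ner_words, item.2.1 ≠ "DATE" → item.2.2 ≤ (words.length : Int)) (i : Int) :
    i ∈ ner_words.foldl (fun acc item =>
      if item.2.1 == "DATE" then acc
      else acc ++ PySem.List.pyRange
        (((PySem.List.pyRange 0 item.2.2 1).map (fun j => PySem.Str.len ((PySem.List.pyGet? words j).getD ""))).sum)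
        (((PySem.List.pyRange 0 item.2.2 1).map (fun j => PySem.Str.len ((PySem.List.pyGet? words j).getD ""))).sum + PySem.Str.len item.1) 1) []
      ↔ Pmem words ner_words i := by
  rw [show (fun (acc : List Int) (item : String × String × Int) =>
      if item.2.1 == "DATE" then acc
      else acc ++ PySem.List.pyRange
        (((PySem.List.pyRange 0 item.2.2 1).map (fun j => PySem.Str.len ((PySem.List.pyGet? words j).getD ""))).sum)
        (((PySem.List.pyRange 0 item.2.2 1).map (fun j => PySem.Str.len ((PySem.List.pyGet? words j).getD ""))).sum + PySem.Str.len item.1) 1)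
    = (fun acc item => acc ++ (if item.2.1 == "DATE" then [] else PySem.List.pyRange
        (((PySem.List.pyRange 0 item.2.2 1).map (fun j => PySem.Str.len ((PySem.List.pyGet? words j).getD ""))).sum)
        (((PySem.List.pyRange 0 item.2.2 1).map (fun j => PySem.Str.len ((PySem.List.pyGet? words j).getD ""))).sum + PySem.Str.len item.1) 1)) from by
      funext acc item; by_cases hd : item.2.1 == "DATE" <;> simp [hd],
    PySem.List.foldl_append_eq_flatMap, List.nil_append, List.mem_flatMap]
  unfold Pmem
  constructor
  · rintro ⟨item, hmem, hin⟩
    by_cases hd : item.2.1 = "DATE"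
    · simp [hd] at hin
    · rw [if_neg (by simpa using hd)] at hin
      rw [startA_eq words item.2.2 (h item hmem hd), PySem.List.mem_pyRange_one] at hin
      exact ⟨item, hmem, hd, hin.1, by rw [PySem.Str.len_eq] at hin; exact hin.2⟩
  · rintro ⟨item, hmem, hd, h1, h2⟩
    refine ⟨item, hmem, ?_⟩
    rw [if_neg (by simpa using hd), PySem.List.mem_pyRange_one,
      startA_eq words item.2.2 (h item hmem hd), PySem.Str.len_eq]
    exact ⟨h1, h2⟩

theorem memB (words : List String) (ner_words : List (String × String × Int))
    (h : ∀ item ∈ ner_words, item.2.1 ≠ "DATE" → item.2.2 ≤ (words.length : Int)) (i : Int) :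
    i ∈ ner_words.foldl (fun s item =>
      if item.2.1 == "DATE" then s
      else PySem.Set.update s (PySem.List.pyRange
        (if item.2.2 > 0
          then PySem.List.pyGetD (words.foldl
            (fun st w => (st.1 ++ [st.2 + PySem.Str.len w], st.2 + PySem.Str.len w)) (([0] : List Int), (0 : Int))).1 item.2.2 0
          else 0)
        ((if item.2.2 > 0
          then PySem.List.pyGetD (words.foldl
            (fun st w => (st.1 ++ [st.2 + PySem.Str.len w], st.2 + PySem.Str.len w)) (([0] : List Int), (0 : Int))).1 item.2.2 0
          else 0) + PySem.Str.len item.1) 1)) PySem.Set.empty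
      ↔ Pmem words ner_words i := by
  suffices H : ∀ (l : List (String × String × Int)) (s : PySem.Set Int),
      (∀ item ∈ l, item.2.1 ≠ "DATE" → item.2.2 ≤ (words.length : Int)) →
      (i ∈ l.foldl (fun s item =>
        if item.2.1 == "DATE" then s
        else PySem.Set.update s (PySem.List.pyRange
          (if item.2.2 > 0
            then PySem.List.pyGetD (words.foldl
              (fun st w => (st.1 ++ [st.2 + PySem.Str.len w], st.2 + PySem.Str.len w)) (([0] : List Int), (0 : Int))).1 item.2.2 0
            else 0)
          ((if item.2.2 > 0
            then PySem.List.pyGetD (words.foldl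
              (fun st w => (st.1 ++ [st.2 + PySem.Str.len w], st.2 + PySem.Str.len w)) (([0] : List Int), (0 : Int))).1 item.2.2 0
            else 0) + PySem.Str.len item.1) 1)) s
        ↔ i ∈ s ∨ Pmem words l i) by
    rw [H ner_words PySem.Set.empty h]
    simp [PySem.Set.empty]
  intro l
  induction l with
  | nil => intro s _; simp [Pmem]
  | cons item rest ih =>
    intro s hl
    rw [List.foldl_cons]
    by_cases hd : item.2.1 = "DATE"
    · rw [if_pos (by simpa using hd), ih s (fun x hx => hl x (List.mem_cons_of_mem _ hx))]
      unfold Pmem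
      constructor
      · rintro (hs | ⟨it, hm, rest'⟩)
        · exact Or.inl hs
        · exact Or.inr ⟨it, List.mem_cons_of_mem _ hm, rest'⟩
      · rintro (hs | ⟨it, hm, hnd, hb⟩)
        · exact Or.inl hs
        · rcases List.mem_cons.mp hm with rfl | hm'
          · exact absurd hd hnd
          · exact Or.inr ⟨it, hm', hnd, hb⟩
    · rw [if_neg (by simpa using hd), ih _ (fun x hx => hl x (List.mem_cons_of_mem _ hx)),
        PySem.Set.mem_update]
      have hb := startB_eq words item.2.2 (hl item (List.mem_cons_self) hd)
      rw [hb, PySem.List.mem_pyRange_one]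
      unfold Pmem
      constructor
      · rintro ((hs | hr) | ⟨it, hm, hnd, hbnd⟩)
        · exact Or.inl hs
        · exact Or.inr ⟨item, List.mem_cons_self, hd, by rw [PySem.Str.len_eq] at hr; exact hr⟩
        · exact Or.inr ⟨it, List.mem_cons_of_mem _ hm, hnd, hbnd⟩
      · rintro (hs | ⟨it, hm, hnd, hbnd⟩)
        · exact Or.inl (Or.inl hs)
        · rcases List.mem_cons.mp hm with rfl | hm'
          · exact Or.inl (Or.inr (by rw [PySem.Str.len_eq]; exact hbnd))
          · exact Or.inr ⟨it, hm', hnd, hbnd⟩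

theorem foldA_len (trg : List Char) (ids : List Int) (L : List Int) (src : List Char) :
    (L.foldl (fun st i =>
      if ids.contains i && (PySem.List.pyGetD st i ' ' != PySem.List.pyGetD trg i ' ')
      then PySem.List.pySetD st i (PySem.List.pyGetD trg i ' ')
      else st) src).length = src.length := by
  induction L generalizing src with
  | nil => rfl
  | cons a l ih =>
    rw [List.foldl_cons, ih]
    by_cases hc : (ids.contains a && (PySem.List.pyGetD src a ' ' != PySem.List.pyGetD trg a ' ')) = true
    · rw [if_pos hc, PySem.List.length_pySetD]
    · rw [if_neg hc]

theorem foldA_get (trg : List Char) (ids : List Int) (n : Nat) (src : List Char) (j : Nat)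
    (hj : j < src.length) :
    PySem.List.pyGetD ((PySem.List.pyRange 0 (n : Int) 1).foldl (fun st i =>
      if ids.contains i && (PySem.List.pyGetD st i ' ' != PySem.List.pyGetD trg i ' ')
      then PySem.List.pySetD st i (PySem.List.pyGetD trg i ' ')
      else st) src) (j : Int) ' '
      = if ids.contains (j : Int) ∧ j < n then PySem.List.pyGetD trg (j : Int) ' '
        else PySem.List.pyGetD src (j : Int) ' ' := by
  induction n with
  | zero =>
    rw [show ((0 : Nat) : Int) = 0 from rfl, PySem.List.pyRange_one_eq_nil le_rfl]
    simp
  | succ m ih =>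
    rw [show ((m + 1 : Nat) : Int) = (m : Int) + 1 by push_cast; ring,
      PySem.List.pyRange_one_succ_right (by positivity), List.foldl_append, List.foldl_cons, List.foldl_nil]
    set M := (PySem.List.pyRange 0 (m : Int) 1).foldl (fun st i =>
      if ids.contains i && (PySem.List.pyGetD st i ' ' != PySem.List.pyGetD trg i ' ')
      then PySem.List.pySetD st i (PySem.List.pyGetD trg i ' ')
      else st) src with hM
    have hMlen : M.length = src.length := foldA_len trg ids _ src
    by_cases hc : (ids.contains (m : Int) && (PySem.List.pyGetD M (m : Int) ' ' != PySem.List.pyGetD trg (m : Int) ' ')) = true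
    · rw [if_pos hc]
      by_cases hmlt : m < src.length
      · rw [PySem.List.pySetD_natCast]
        rw [show PySem.List.pyGetD (M.set m (PySem.List.pyGetD trg (m:Int) ' ')) (j:Int) ' '
            = if j = m then PySem.List.pyGetD trg (m:Int) ' ' else PySem.List.pyGetD M (j:Int) ' ' from by
          rw [← PySem.List.pySetD_natCast, PySem.List.pyGetD_pySetD_natCast _ _ _ _ _ (by omega : m < M.length)]]
        by_cases hjm : j = m
        · subst hjm
          rw [if_pos rfl]
          have : ids.contains (j : Int) ∧ j < j + 1 := ⟨by simpa using (Bool.and_elim_left hc), by omega⟩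
          rw [if_pos this]
        · rw [if_neg hjm, ih]
          by_cases h1 : ids.contains (j : Int) ∧ j < m
          · rw [if_pos h1, if_pos ⟨h1.1, by omega⟩]
          · rw [if_neg h1, if_neg (by rintro ⟨hc1, hlt⟩; exact h1 ⟨hc1, by omega⟩)]
      · rw [PySem.List.pySetD_natCast, List.set_eq_of_length_le (by omega), ih]
        by_cases h1 : ids.contains (j : Int) ∧ j < m
        · rw [if_pos h1, if_pos ⟨h1.1, by omega⟩]
        · rw [if_neg h1, if_neg (by rintro ⟨hc1, hlt⟩; exact h1 ⟨hc1, by omega⟩)]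
    · rw [if_neg hc, ih]
      by_cases h1 : ids.contains (j : Int) ∧ j < m
      · rw [if_pos h1, if_pos ⟨h1.1, by omega⟩]
      · by_cases h2 : ids.contains (j : Int) ∧ j < m + 1
        · have hjm : j = m := by
            by_cases hlt : j < m
            · exact absurd ⟨h2.1, hlt⟩ h1
            · omega
          subst hjm
          have heq : PySem.List.pyGetD M (j : Int) ' ' = PySem.List.pyGetD trg (j : Int) ' ' := by
            by_contra hne
            exact hc (by rw [h2.1, Bool.true_and]; exact bne_iff_ne.mpr hne)
          rw [if_neg h1, if_pos h2, ← heq, ih, if_neg (by rintro ⟨_, hlt⟩; omega)]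
        · rw [if_neg h1, if_neg h2]

-- ===== VERDICT (by name: the statement is the Claim_ definition above) =====
theorem replace_token_spec : Claim_equal_replace_token := by
  intro line words ner_words error_line _ hpre
  have hcond1 : ∀ item ∈ ner_words, item.2.1 ≠ "DATE" → item.2.2 ≤ (words.length : Int) :=
    fun it hm hd => (hpre it hm hd).1
  unfold Spec_replace_token
  simp only [replace_token, replace_token_alt]
  rw [show PySem.Str.len line = ((line.toList.length : Nat) : Int) from PySem.Str.len_eq line]
  refine congrArg String.ofList (List.ext_getElem ?_ ?_)
  · rw [foldA_len]
    rw [List.length_map, PySem.List.length_enumerate]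
  · intro j hj1 hj2
    have hjs : j < error_line.toList.length := by rw [foldA_len] at hj1; exact hj1
    have hLA : ∀ (L : List Char) (hL : j < L.length), L[j] = PySem.List.pyGetD L (j : Int) ' ' := by
      intro L hL
      rw [PySem.List.pyGetD_natCast, List.getD_eq_getElem _ _ hL]
    rw [hLA _ hj1, foldA_get _ _ _ _ _ hjs]
    rw [List.getElem_map, PySem.List.getElem_enumerate]
    simp only [Int.zero_add]
    split_ifs with h1 h2 h2
    · rfl
    · exfalso
      rw [List.contains_iff_mem, memA words ner_words hcond1] at h1
      simp only [Bool.and_eq_true, decide_eq_true_eq, PySem.Set.contains_iff, not_and] at h2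
      exact h2 (by exact_mod_cast h1.2) ((memB words ner_words hcond1 _).mpr h1.1)
    · exfalso
      simp only [Bool.and_eq_true, decide_eq_true_eq, PySem.Set.contains_iff] at h2
      rw [memB words ner_words hcond1] at h2
      exact h1 ⟨by rw [List.contains_iff_mem, memA words ner_words hcond1]; exact h2.2, by exact_mod_cast h2.1⟩
    · exact (hLA _ hjs).symm
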